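-- pv_equiv track=rewrite | github.com/MaartensInformatica/Groep-7-periode-3 | Weektaak 2.py | count_per_100_bp
-- ===== SOURCE A (Python) =====
-- def count_per_100_bp(list_genome):
--     """"
--     """
--
--     list_genome_100 = []
--
--     count = 0
--     total_count = 0
--     hundred_bp = ""
--     for line in list_genome:
--         total_count += 1
--         for nucleotide in line:
--             hundred_bp += nucleotide
--             count += 1
--             if count == 100:
--                 list_genome_100.append(hundred_bp)
--                 hundred_bp = ""
--                 count = 0
--         if total_count == len(list_genome):
--             list_genome_100.append(hundred_bp)
--
--     return list_genome_100
-- ===== SOURCE B (Python) =====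
-- def count_per_100_bp(list_genome):
--     if not list_genome:
--         return []
--     genome = "".join(list_genome)
--     n = len(genome)
--     cut = n - n % 100
--     result = [genome[i:i + 100] for i in range(0, cut, 100)]
--     result.append(genome[cut:])
--     return result
-- ===== Notes on version B (the rewrite author's own statement) =====
-- stated objective: faster
-- what changed: Replaces the character-by-character accumulator loop (count/buffer state threaded across lines) with a single join followed by index-based 100-char slicing plus one remainder append.
import Mathlib
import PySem

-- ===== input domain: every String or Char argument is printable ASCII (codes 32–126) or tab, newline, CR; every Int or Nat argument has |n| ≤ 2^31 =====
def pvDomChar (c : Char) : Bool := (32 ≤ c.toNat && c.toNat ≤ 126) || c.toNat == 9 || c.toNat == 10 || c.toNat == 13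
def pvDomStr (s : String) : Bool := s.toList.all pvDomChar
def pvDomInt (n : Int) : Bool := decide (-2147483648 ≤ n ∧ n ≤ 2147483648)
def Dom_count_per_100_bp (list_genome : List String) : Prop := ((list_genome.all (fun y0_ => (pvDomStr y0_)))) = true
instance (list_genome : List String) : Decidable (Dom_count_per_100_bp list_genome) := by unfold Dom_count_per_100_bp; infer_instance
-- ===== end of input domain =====

-- B joins the lines once and takes 100-char slices by index instead of A's
-- per-character accumulator loop; return values proved equal on all inputs.

-- ===== PORT A =====
-- inner loop body: for nucleotide in line: hundred_bp += nucleotide; count += 1; if count == 100: append/reset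
def pvInnerA (st : List String × Int × List Char) (c : Char) : List String × Int × List Char :=
  let buf := st.2.2 ++ [c]
  let count := st.2.1 + 1
  if count == 100 then (st.1 ++ [String.mk buf], 0, ([] : List Char))
  else (st.1, count, buf)

def count_per_100_bp (list_genome : List String) : List String :=
  (list_genome.foldl
    (fun (st : List String × Int × Int × List Char) line =>
      let total := st.2.2.1 + 1
      let st2 := line.toList.foldl pvInnerA (st.1, st.2.1, st.2.2.2)
      if total == (list_genome.length : Int) then
        (st2.1 ++ [String.mk st2.2.2], st2.2.1, total, st2.2.2)
      else (st2.1, st2.2.1, total, st2.2.2))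
    (([] : List String), (0 : Int), (0 : Int), ([] : List Char))).1

-- ===== PORT B =====
def count_per_100_bp_alt (list_genome : List String) : List String :=
  if list_genome = [] then []
  else
    let genome : List Char := (list_genome.map String.toList).flatten
    let n : Int := (genome.length : Int)
    let cut : Int := n - PySem.Int.mod n 100
    ((PySem.List.pyRange 0 cut 100).map
        (fun i => String.mk (PySem.List.slice genome (some i) (some (i + 100)))))
      ++ [String.mk (PySem.List.slice genome (some cut) (some n))]

-- ===== PRECONDITION & SPEC =====
def Spec_count_per_100_bp (list_genome : List String) (out : List String) : Prop := out = count_per_100_bp_alt list_genome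
instance (list_genome : List String) (out : List String) : Decidable (Spec_count_per_100_bp list_genome out) := by unfold Spec_count_per_100_bp; infer_instance

-- ===== CLAIM (what is proved, stated in full; the proofs are below) =====
def Claim_equal_count_per_100_bp : Prop := ∀ (list_genome : List String), Dom_count_per_100_bp list_genome → Spec_count_per_100_bp list_genome (count_per_100_bp list_genome)

-- ===== LEMMAS AND PROOFS =====

-- full 100-char chunks and the remainder of a char list
def pvChunks (cs : List Char) : List String × List Char :=
  if _h : cs.length < 100 then ([], cs)
  else
    let p := pvChunks (cs.drop 100)
    (String.mk (cs.take 100) :: p.1, p.2)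
termination_by cs.length
decreasing_by simp; omega

lemma pvChunks_lt (cs : List Char) (h : cs.length < 100) : pvChunks cs = ([], cs) := by
  rw [pvChunks]; simp [h]

lemma pvChunks_ge (cs : List Char) (h : ¬ cs.length < 100) :
    pvChunks cs = (String.mk (cs.take 100) :: (pvChunks (cs.drop 100)).1, (pvChunks (cs.drop 100)).2) := by
  rw [pvChunks]; simp [h]

lemma pvChunks_snd_lt (cs : List Char) : (pvChunks cs).2.length < 100 := by
  by_cases h : cs.length < 100
  · rw [pvChunks_lt cs h]; exact h
  · rw [pvChunks_ge cs h]
    exact pvChunks_snd_lt (cs.drop 100)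
termination_by cs.length
decreasing_by simp; omega

lemma pvChunks_append (xs ys : List Char) :
    pvChunks (xs ++ ys) =
      ((pvChunks xs).1 ++ (pvChunks ((pvChunks xs).2 ++ ys)).1,
       (pvChunks ((pvChunks xs).2 ++ ys)).2) := by
  by_cases h : xs.length < 100
  · rw [pvChunks_lt xs h]; simp
  · rw [pvChunks_ge xs h]
    have hlen : ¬ (xs ++ ys).length < 100 := by simp; omega
    rw [pvChunks_ge _ hlen]
    have ht : (xs ++ ys).take 100 = xs.take 100 := List.take_append_of_le_length (by omega)
    have hd : (xs ++ ys).drop 100 = xs.drop 100 ++ ys := List.drop_append_of_le_length (by omega)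
    rw [ht, hd, pvChunks_append (xs.drop 100) ys]
    simp
termination_by xs.length
decreasing_by simp; omega

-- A's inner character loop computes pvChunks of buffer ++ chars
lemma innerA_eq (cs : List Char) : ∀ (acc : List String) (buf : List Char), buf.length < 100 →
    cs.foldl pvInnerA (acc, (buf.length : Int), buf) =
      (acc ++ (pvChunks (buf ++ cs)).1, ((pvChunks (buf ++ cs)).2.length : Int), (pvChunks (buf ++ cs)).2) := by
  induction cs with
  | nil =>
    intro acc buf hb
    simp only [List.append_nil]
    rw [pvChunks_lt buf hb]
    simp
  | cons c cs ih =>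
    intro acc buf hb
    simp only [List.foldl_cons]
    by_cases h99 : buf.length = 99
    · have hstep : pvInnerA (acc, (buf.length : Int), buf) c = (acc ++ [String.mk (buf ++ [c])], 0, ([] : List Char)) := by
        simp [pvInnerA, h99]
      rw [hstep]
      have : (0 : Int) = (([] : List Char).length : Int) := by simp
      rw [this, ih (acc ++ [String.mk (buf ++ [c])]) [] (by simp)]
      have hge : ¬ (buf ++ c :: cs).length < 100 := by simp; omega
      rw [pvChunks_ge _ hge]
      have hbc : buf ++ c :: cs = (buf ++ [c]) ++ cs := by simp
      have ht : (buf ++ c :: cs).take 100 = buf ++ [c] := by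
        rw [hbc, List.take_append_of_le_length (by simp; omega)]
        simp [List.take_of_length_le, h99]
      have hd : (buf ++ c :: cs).drop 100 = cs := by
        rw [hbc, List.drop_append_of_le_length (by simp; omega)]
        simp [List.drop_of_length_le, h99]
      rw [ht, hd]
      simp
    · have hstep : pvInnerA (acc, (buf.length : Int), buf) c = (acc, ((buf ++ [c]).length : Int), buf ++ [c]) := by
        simp [pvInnerA]
        omega
      rw [hstep, ih acc (buf ++ [c]) (by simp; omega)]
      simp

-- A's outer loop on a nonempty tail: appends the remainder exactly once, on the last line
lemma outerA_eq (L : Int) (f : List String × Int × Int × List Char → String → List String × Int × Int × List Char)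
    (hf : ∀ st line, f st line =
      (let total := st.2.2.1 + 1
       let st2 := line.toList.foldl pvInnerA (st.1, st.2.1, st.2.2.2)
       if total == L then (st2.1 ++ [String.mk st2.2.2], st2.2.1, total, st2.2.2)
       else (st2.1, st2.2.1, total, st2.2.2))) :
    ∀ (rest : List String), rest ≠ [] → ∀ (acc : List String) (buf : List Char) (k : Int),
      buf.length < 100 → k + rest.length = L →
      (rest.foldl f (acc, (buf.length : Int), k, buf)).1 =
        acc ++ (pvChunks (buf ++ (rest.map String.toList).flatten)).1
            ++ [String.mk (pvChunks (buf ++ (rest.map String.toList).flatten)).2] := by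
  intro rest
  induction rest generalizing L f with
  | nil => intro h; exact absurd rfl h
  | cons r rest ih =>
    intro _ acc buf k hb hk
    simp only [List.foldl_cons]
    rw [hf]
    simp only
    rw [innerA_eq r.toList acc buf hb]
    cases rest with
    | nil =>
      have hEq : (k + 1 == L) = true := by simp at hk ⊢; omega
      rw [if_pos hEq]
      simp
    | cons r2 rest2 =>
      have hne : (k + 1 == L) = false := by simp at hk ⊢; omega
      rw [if_neg (by simp at hne ⊢; omega)]
      rw [ih L f hf (by simp) _ _ _ (pvChunks_snd_lt _) (by simp at hk ⊢; omega)]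
      have hsplit := pvChunks_append (buf ++ r.toList) (((r2 :: rest2).map String.toList).flatten)
      simp only [List.map_cons, List.flatten_cons, List.append_assoc] at hsplit ⊢
      rw [hsplit]
      simp

-- full chunks as drop/take slices, indexed by k < len/100
lemma chunks_fst (m : Nat) : ∀ cs : List Char, m = cs.length / 100 →
    (List.range m).map (fun k => String.mk ((cs.drop (100 * k)).take 100)) = (pvChunks cs).1 := by
  induction m with
  | zero =>
    intro cs hm
    rw [pvChunks_lt cs (by omega)]
    simp
  | succ m ih =>
    intro cs hm
    have hge : ¬ cs.length < 100 := by omega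
    rw [pvChunks_ge cs hge]
    rw [List.range_succ_eq_map, List.map_cons, List.map_map]
    have h1 : String.mk ((cs.drop (100 * 0)).take 100) = String.mk (cs.take 100) := by simp
    rw [h1]
    rw [← ih (cs.drop 100) (by simp; omega)]
    congr 1
    apply List.map_congr_left
    intro k _
    simp only [Function.comp]
    rw [List.drop_drop, show 100 * (k + 1) = 100 + 100 * k from by ring]

lemma chunks_snd (m : Nat) : ∀ cs : List Char, m = cs.length / 100 →
    cs.drop (100 * m) = (pvChunks cs).2 := by
  induction m with
  | zero =>
    intro cs hm
    rw [pvChunks_lt cs (by omega)]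
    simp
  | succ m ih =>
    intro cs hm
    have hge : ¬ cs.length < 100 := by omega
    rw [pvChunks_ge cs hge]
    rw [← ih (cs.drop 100) (by simp; omega), List.drop_drop,
      show 100 * (m + 1) = 100 + 100 * m from by ring]

-- B's slice comprehension computes pvChunks
lemma altB_eq (cs : List Char) :
    ((PySem.List.pyRange 0 ((cs.length : Int) - PySem.Int.mod (cs.length : Int) 100) 100).map
        (fun i => String.mk (PySem.List.slice cs (some i) (some (i + 100)))))
      = (pvChunks cs).1 ∧
    PySem.List.slice cs (some ((cs.length : Int) - PySem.Int.mod (cs.length : Int) 100)) (some (cs.length : Int))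
      = (pvChunks cs).2 := by
  have hmod : PySem.Int.mod ((cs.length : Int)) 100 = (cs.length : Int) % 100 :=
    PySem.Int.mod_eq_emod_of_pos (by norm_num)
  have hcut : (cs.length : Int) - PySem.Int.mod ((cs.length : Int)) 100 = ((100 * (cs.length / 100) : Nat) : Int) := by
    rw [hmod]; omega
  have hrange : PySem.List.pyRange 0 ((cs.length : Int) - PySem.Int.mod ((cs.length : Int)) 100) 100
      = (List.range (cs.length / 100)).map (fun k => ((100 * k : Nat) : Int)) := by
    rw [hcut, PySem.List.pyRange_of_pos 0 _ (by norm_num)]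
    have hN : (if (0 : Int) < ((100 * (cs.length / 100) : Nat) : Int)
        then ((((100 * (cs.length / 100) : Nat) : Int) - 0 + 100 - 1) / 100).toNat else 0) = cs.length / 100 := by
      split <;> omega
    rw [hN]
    apply List.map_congr_left
    intro k _
    push_cast
    ring
  constructor
  · rw [hrange, List.map_map]
    rw [← chunks_fst (cs.length / 100) cs rfl]
    apply List.map_congr_left
    intro k _
    simp only [Function.comp]
    have : ((100 * k : Nat) : Int) + 100 = ((100 * k + 100 : Nat) : Int) := by push_cast; ring
    rw [this, PySem.List.slice_natCast]
    congr 2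
    omega
  · rw [hcut, PySem.List.slice_natCast]
    rw [← chunks_snd (cs.length / 100) cs rfl]
    rw [List.take_of_length_le (by simp)]

-- ===== VERDICT (by name: the statement is the Claim_ definition above) =====
theorem count_per_100_bp_spec : Claim_equal_count_per_100_bp := by
  intro lg _
  unfold Spec_count_per_100_bp
  cases lg with
  | nil => rfl
  | cons r rest =>
    have h := outerA_eq ((r :: rest).length : Int) _ (fun st line => rfl) (r :: rest) (by simp) [] [] 0 (by simp) (by simp)
    simp only [List.nil_append] at h
    have hb := altB_eq (((r :: rest).map String.toList).flatten)
    have hbeq : count_per_100_bp_alt (r :: rest)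
        = (pvChunks (((r :: rest).map String.toList).flatten)).1
          ++ [String.mk (pvChunks (((r :: rest).map String.toList).flatten)).2] := by
      unfold count_per_100_bp_alt
      rw [if_neg (by simp)]
      simp only [hb.1, hb.2]
    exact h.trans hbeq.symm
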